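-- pv_equiv track=rewrite | github.com/VangaLasyaSri/Litcoder | main/Labs/Module_3/Sliding_Subarray_Beauty.py | ssb
-- ===== SOURCE A (Python) =====
-- def ssb(arr, k, n):
--     res = []
--
--     def nth_sisa(sa, n):
--         s_sa = sorted(sa)
--         return s_sa[n-1]
--     c_sa = arr[:k]
--     res.append(nth_sisa(c_sa, n))
--
--     for i in range(k, len(arr)):
--         c_sa.pop(0)
--         c_sa.append(arr[i])
--         res.append(nth_sisa(c_sa, n))
--     return res
-- ===== SOURCE B (Python) =====
-- def _insert_sorted(win, x):
--     j = 0
--     while j < len(win) and win[j] < x: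
--         j += 1
--     return win[:j] + [x] + win[j:]
--
--
-- def _remove_first(win, v):
--     j = 0
--     while win[j] != v:
--         j += 1
--     return win[:j] + win[j + 1:]
--
--
-- def ssb(arr, k, n):
--     win = sorted(arr[:k])
--     res = [win[n - 1]]
--     for i in range(k, len(arr)):
--         win = _remove_first(_insert_sorted(win, arr[i]), arr[i - k])
--         res.append(win[n - 1])
--     return res
-- ===== Notes on version B (the rewrite author's own statement) =====
-- stated objective: alternative
-- what changed: A re-sorts the whole window for every position; B sorts once and then maintains the sorted window incrementally, inserting the incoming element at its position and deleting the first occurrence of the outgoing one.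
-- outside the precondition, e.g. on ssb([1, 2], -1, 1): A returns [1, 2, 1, 2], B raises IndexError
import Mathlib
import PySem

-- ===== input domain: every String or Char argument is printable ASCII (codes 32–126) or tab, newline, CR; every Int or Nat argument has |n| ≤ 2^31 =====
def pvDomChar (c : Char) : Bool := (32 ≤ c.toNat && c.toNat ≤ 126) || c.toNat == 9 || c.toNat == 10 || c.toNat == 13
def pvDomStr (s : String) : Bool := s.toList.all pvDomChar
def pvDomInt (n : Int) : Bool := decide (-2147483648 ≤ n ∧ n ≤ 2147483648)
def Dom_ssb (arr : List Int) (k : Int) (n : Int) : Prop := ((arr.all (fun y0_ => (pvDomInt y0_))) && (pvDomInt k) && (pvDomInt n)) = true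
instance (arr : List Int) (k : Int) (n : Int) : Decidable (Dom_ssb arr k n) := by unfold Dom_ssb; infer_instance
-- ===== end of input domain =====

-- B keeps the sliding window as a sorted list maintained incrementally (insert the incoming element, delete the
-- first occurrence of the outgoing one) instead of A's re-sorting of the whole window at every position.


-- ===== PORT A =====
-- A's nested helper nth_sisa(sa, n) = sorted(sa)[n-1]
def ssbNth (sa : List Int) (n : Int) : Int :=
  (PySem.List.pyGet? (PySem.List.sorted sa (fun y => y) false) (n - 1)).getD 0

def ssb (arr : List Int) (k : Int) (n : Int) : List Int :=
  let c0 := PySem.List.slice arr none (some k)               -- c_sa = arr[:k]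
  let st := (PySem.List.pyRange k (arr.length : Int) 1).foldl -- for i in range(k, len(arr))
    (fun (st : List Int × List Int) i =>
      let p := (PySem.List.pop? st.1 0).getD (0, [])          -- c_sa.pop(0)
      let c := p.2 ++ [(PySem.List.pyGet? arr i).getD 0]      -- c_sa.append(arr[i])
      (c, st.2 ++ [ssbNth c n]))                              -- res.append(nth_sisa(c_sa, n))
    (c0, [ssbNth c0 n])
  st.2

-- ===== PORT B =====
-- _insert_sorted: the while loop computes j = length of the maximal prefix with win[j] < x, then win[:j] + [x] + win[j:]
def insSorted (win : List Int) (x : Int) : List Int :=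
  let j := (win.takeWhile (fun y => decide (y < x))).length
  win.take j ++ x :: win.drop j

-- _remove_first: the while loop computes j = length of the maximal prefix with win[j] != v, then win[:j] + win[j+1:]
def removeFirst (win : List Int) (v : Int) : List Int :=
  let j := (win.takeWhile (fun y => decide (y ≠ v))).length
  win.take j ++ win.drop (j + 1)

def ssb_alt (arr : List Int) (k : Int) (n : Int) : List Int :=
  let win0 := PySem.List.sorted (PySem.List.slice arr none (some k)) (fun y => y) false  -- win = sorted(arr[:k])
  let st := (PySem.List.pyRange k (arr.length : Int) 1).foldl
    (fun (st : List Int × List Int) i =>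
      let w := removeFirst (insSorted st.1 ((PySem.List.pyGet? arr i).getD 0))
                 ((PySem.List.pyGet? arr (i - k)).getD 0)
      (w, st.2 ++ [(PySem.List.pyGet? w (n - 1)).getD 0]))
    (win0, [(PySem.List.pyGet? win0 (n - 1)).getD 0])
  st.2

-- ===== PRECONDITION & SPEC =====
-- Pre_ restricts to the natural domain (nonempty array, k >= 1, rank index n-1 valid for the window length):
-- elsewhere A raises IndexError, except for k <= 0 where A's negative-slice/negative-index window behaviour is
-- an accident of Python wraparound, outside the task's natural domain.
def Pre_ssb (arr : List Int) (k : Int) (n : Int) : Prop :=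
  arr ≠ [] ∧ 1 ≤ k ∧ PySem.Raise.InRange (min k.toNat arr.length) (n - 1)
instance (arr : List Int) (k : Int) (n : Int) : Decidable (Pre_ssb arr k n) := by
  unfold Pre_ssb; infer_instance

def pvWitness_ssb : List Int × Int × Int := ([3, 1, 2, 4], 2, 1)

def Spec_ssb (arr : List Int) (k : Int) (n : Int) (out : List Int) : Prop := out = ssb_alt arr k n
instance (arr : List Int) (k : Int) (n : Int) (out : List Int) : Decidable (Spec_ssb arr k n out) := by unfold Spec_ssb; infer_instance

-- ===== CLAIM (what is proved, stated in full; the proofs are below) =====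
def Claim_equal_ssb : Prop := ∀ (arr : List Int) (k : Int) (n : Int), Dom_ssb arr k n → Pre_ssb arr k n → Spec_ssb arr k n (ssb arr k n)

-- ===== LEMMAS AND PROOFS =====

-- B's hand-written insertion is Mathlib's orderedInsert
lemma insSorted_eq_orderedInsert (win : List Int) (x : Int) :
    insSorted win x = List.orderedInsert (· ≤ ·) x win := by
  induction win with
  | nil => rfl
  | cons a t ih =>
    by_cases h : a < x
    · simp [insSorted, List.orderedInsert, List.takeWhile, h, not_le.mpr h] at *
      simpa [insSorted] using ih
    · simp [insSorted, List.orderedInsert, List.takeWhile, h, not_lt.mp h]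

-- B's hand-written first-occurrence removal is List.erase
lemma removeFirst_eq_erase (win : List Int) (v : Int) :
    removeFirst win v = win.erase v := by
  induction win with
  | nil => rfl
  | cons a t ih =>
    by_cases h : a = v
    · simp [removeFirst, List.takeWhile, h]
    · simp only [removeFirst, List.takeWhile] at *
      simp [h, ← ih]

lemma sorted_step (h : Int) (t : List Int) (x : Int) :
    removeFirst (insSorted (PySem.List.sorted (h :: t) (fun y => y) false) x) h
      = PySem.List.sorted (t ++ [x]) (fun y => y) false := by
  set s := PySem.List.sorted (h :: t) (fun y => y) false with hs
  have hperm : s.Perm (h :: t) := PySem.List.sorted_perm _ _ _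
  have hsort : List.Pairwise (· ≤ ·) s := PySem.List.sorted_pairwise (h :: t) (fun y => y)
  rw [insSorted_eq_orderedInsert, removeFirst_eq_erase]
  have h1 : List.Pairwise (· ≤ · : Int → Int → Prop) (List.orderedInsert (· ≤ ·) x s) :=
    List.Pairwise.orderedInsert x s hsort
  have h2 : (List.orderedInsert (· ≤ ·) x s).Perm (x :: s) := List.perm_orderedInsert _ _ _
  have hp3 : ((List.orderedInsert (· ≤ ·) x s).erase h).Perm ((x :: h :: t).erase h) :=
    (h2.trans (hperm.cons x)).erase h
  have hxh : (x :: h :: t).erase h = x :: t := by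
    by_cases hx : x = h
    · simp [hx]
    · simp [hx]
  have hfinal : ((List.orderedInsert (· ≤ ·) x s).erase h).Perm (t ++ [x]) := by
    rw [hxh] at hp3
    exact hp3.trans (List.perm_append_singleton x t).symm
  have hsortL : List.Pairwise (· ≤ · : Int → Int → Prop) ((List.orderedInsert (· ≤ ·) x s).erase h) :=
    List.Pairwise.sublist List.erase_sublist h1
  have hsortR : List.Pairwise (· ≤ · : Int → Int → Prop) (PySem.List.sorted (t ++ [x]) (fun y => y) false) :=
    PySem.List.sorted_pairwise _ _
  have hpermR : (PySem.List.sorted (t ++ [x]) (fun y => y) false).Perm (t ++ [x]) :=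
    PySem.List.sorted_perm _ _ _
  exact List.Perm.eq_of_pairwise (fun a b _ _ hab hba => le_antisymm hab hba)
    hsortL hsortR (hfinal.trans hpermR.symm)

-- the two loops, related by "B's window = sorted of A's window"
lemma loop_eq (arr : List Int) (k n : Int) (hk : 1 ≤ k) :
    ∀ (d a : Nat), a + k.toNat + d = arr.length →
    ∀ (r : List Int),
    ((PySem.List.pyRange ((a : Int) + k) (arr.length : Int) 1).foldl
      (fun (st : List Int × List Int) i =>
        let p := (PySem.List.pop? st.1 0).getD (0, [])
        let c := p.2 ++ [(PySem.List.pyGet? arr i).getD 0]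
        (c, st.2 ++ [ssbNth c n]))
      ((arr.drop a).take k.toNat, r)).2
    = ((PySem.List.pyRange ((a : Int) + k) (arr.length : Int) 1).foldl
      (fun (st : List Int × List Int) i =>
        let w := removeFirst (insSorted st.1 ((PySem.List.pyGet? arr i).getD 0))
                   ((PySem.List.pyGet? arr (i - k)).getD 0)
        (w, st.2 ++ [(PySem.List.pyGet? w (n - 1)).getD 0]))
      (PySem.List.sorted ((arr.drop a).take k.toNat) (fun y => y) false, r)).2 := by
  intro d
  induction d with
  | zero =>
    intro a hlen r
    have hnil : PySem.List.pyRange ((a:Int)+k) (arr.length:Int) 1 = [] := by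
      apply PySem.List.pyRange_one_eq_nil; omega
    simp [hnil]
  | succ d ih =>
    intro a hlen r
    have haL : a < arr.length := by omega
    have haKL : a + k.toNat < arr.length := by omega
    obtain ⟨Km, hKm⟩ : ∃ m, k.toNat = m + 1 := ⟨k.toNat - 1, by omega⟩
    have hcons : PySem.List.pyRange ((a:Int)+k) (arr.length:Int) 1
        = ((a:Int)+k) :: PySem.List.pyRange ((a:Int)+k+1) (arr.length:Int) 1 :=
      PySem.List.pyRange_one_cons (by omega)
    have hwnd : (arr.drop a).take k.toNat
        = arr[a] :: (arr.drop (a+1)).take Km := by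
      rw [hKm, List.drop_eq_getElem_cons haL, List.take_succ_cons]
    have hx : (PySem.List.pyGet? arr ((a:Int)+k)).getD 0 = arr[a + k.toNat] := by
      have : (a:Int)+k = ((a + k.toNat : Nat) : Int) := by push_cast; omega
      rw [this, PySem.List.pyGet?_natCast, List.getElem?_eq_getElem haKL]; rfl
    have hrm : (PySem.List.pyGet? arr ((a:Int)+k - k)).getD 0 = arr[a] := by
      have : (a:Int)+k-k = ((a : Nat) : Int) := by omega
      rw [this, PySem.List.pyGet?_natCast, List.getElem?_eq_getElem haL]; rfl
    have hback : (arr.drop (a+1)).take Km ++ [arr[a + k.toNat]]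
        = (arr.drop (a+1)).take k.toNat := by
      conv_rhs => rw [hKm]
      rw [List.take_add_one, List.getElem?_drop,
        show a + 1 + Km = a + k.toNat by omega,
        List.getElem?_eq_getElem haKL]
      rfl
    have hstep := sorted_step arr[a] ((arr.drop (a+1)).take Km) arr[a + k.toNat]
    rw [hcons]
    simp only [List.foldl_cons]
    have this := ih (a+1) (by omega) (r ++ [ssbNth ((arr.drop (a+1)).take k.toNat) n])
    rw [show ((a+1 : Nat) : Int) + k = (a:Int)+k+1 by push_cast; ring] at this
    simp only [hwnd, PySem.List.pop?_zero_cons, Option.getD_some, hx, hrm, hback]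
    rw [hback] at hstep
    rw [hstep]
    simp only [ssbNth] at this ⊢
    exact this

-- ===== VERDICT (by name: the statement is the Claim_ definition above) =====
theorem ssb_spec : Claim_equal_ssb := by
  unfold Claim_equal_ssb
  intro arr k n _ hpre
  obtain ⟨hne, hk, _⟩ := hpre
  unfold Spec_ssb ssb ssb_alt
  have hslice : PySem.List.slice arr none (some k) = arr.take k.toNat :=
    PySem.List.slice_to arr (by omega)
  by_cases hkL : k ≤ (arr.length : Int)
  · have hloop := loop_eq arr k n hk (arr.length - k.toNat) 0 (by omega)
      [ssbNth (arr.take k.toNat) n]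
    rw [show ((0 : Nat) : Int) + k = k by simp] at hloop
    simp only [List.drop_zero] at hloop
    simp only [hslice, ssbNth]
    exact hloop
  · have hnil : PySem.List.pyRange k (arr.length : Int) 1 = [] :=
      PySem.List.pyRange_one_eq_nil (by omega)
    simp [hnil, hslice, ssbNth]
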